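-- pv_equiv track=rewrite | github.com/ak2ume/python | applications/AtCoder/abc159d.py | abc159d
-- ===== SOURCE A (Python) =====
-- def abc159d(n, arr):
--     dic = {}
--     for a in arr:
--         if a in dic:
--             dic[a] += 1
--         else:
--             dic[a] = 1
--
--     # delete non-paired ball
--     del_list = []
--     for k, val in dic.items():
--         if val == 1:
--             del_list.append(k)
--     for item in del_list:
--         del dic[item]
--
--     typ_ans = 0
--     for val in dic.values():
--         typ_ans += val * (val-1) // 2
--
--     ans = []
--     for a in arr:
--         sum = typ_ans
--         if a in dic:
--             sum -= dic[a] * (dic[a]-1) // 2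
--             new_val = dic[a] - 1
--             sum += new_val * (new_val-1) // 2
--
--         ans.append(sum)
--
--     return ans
-- ===== SOURCE B (Python) =====
-- def abc159d(n, arr):
--     s = sorted(arr)
--     total = 0
--     cnt = {}
--     i = 0
--     while i < len(s):
--         j = i + 1
--         while j < len(s) and s[j] == s[i]:
--             j += 1
--         run = j - i
--         cnt[s[i]] = run
--         total += run * (run - 1) // 2
--         i = j
--     return [total - cnt[a] + 1 for a in arr]
-- ===== Notes on version B (the rewrite author's own statement) =====
-- stated objective: alternative
-- what changed: B sorts the list and scans it once, grouping equal values into runs to get each count and the pair total, instead of A's hash-table frequency count with a singleton-deletion pass and per-element triangle-number re-computation; the per-element answer becomes the closed form total - count + 1.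
import Mathlib
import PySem

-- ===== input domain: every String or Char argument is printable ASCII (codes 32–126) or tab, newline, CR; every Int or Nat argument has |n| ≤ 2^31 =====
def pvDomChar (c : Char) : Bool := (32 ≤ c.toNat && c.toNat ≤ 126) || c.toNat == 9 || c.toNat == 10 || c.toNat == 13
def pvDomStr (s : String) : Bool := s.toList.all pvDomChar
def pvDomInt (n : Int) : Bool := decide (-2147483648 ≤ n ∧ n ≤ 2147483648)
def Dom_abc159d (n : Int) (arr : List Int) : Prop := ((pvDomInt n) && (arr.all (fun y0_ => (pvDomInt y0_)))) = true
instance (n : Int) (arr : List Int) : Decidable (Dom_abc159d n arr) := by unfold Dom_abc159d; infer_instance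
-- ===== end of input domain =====

-- B replaces A's hash-table frequency count (with its singleton-deletion pass and per-element
-- triangle-number adjustment) by a sort-then-run-scan: objective "alternative", no speed claim.

-- ===== PORT A =====
def abc159d (n : Int) (arr : List Int) : List Int :=
  let dic := arr.foldl (fun d a =>
    if d.contains a then d.modify a 0 (· + 1) else d.insert a 1) PySem.Dict.empty
  let delList := dic.items.foldl (fun l p => if p.2 == 1 then l ++ [p.1] else l) ([] : List Int)
  let dic2 := delList.foldl (fun d k => d.erase k) dic
  let typAns := dic2.values.foldl (fun s v => s + PySem.Int.floordiv (v * (v - 1)) 2) 0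
  arr.foldl (fun ans a =>
    let s := typAns
    let s := if dic2.contains a then
        -- dic[a] is guarded by 'a in dic', so getD is exact here
        let c := dic2.getD a 0
        let s := s - PySem.Int.floordiv (c * (c - 1)) 2
        let newVal := c - 1
        s + PySem.Int.floordiv (newVal * (newVal - 1)) 2
      else s
    ans ++ [s]) ([] : List Int)

-- ===== PORT B =====
-- the two while-loops over indices i (outer) and j (inner run end) of Source B, transcribed as
-- recursion on the remaining suffix: run = j - i is 1 + length of the equal prefix of the tail
def abc159dRunScan (s : List Int) (cnt : PySem.Dict Int Int) (total : Int) :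
    PySem.Dict Int Int × Int :=
  match s with
  | [] => (cnt, total)
  | x :: xs =>
    let run : Int := 1 + ((xs.takeWhile (fun y => y == x)).length : Int)
    abc159dRunScan (xs.dropWhile (fun y => y == x)) (cnt.insert x run)
      (total + PySem.Int.floordiv (run * (run - 1)) 2)
termination_by s.length
decreasing_by simpa using Nat.lt_succ_of_le (List.length_dropWhile_le _ _)

def abc159d_alt (n : Int) (arr : List Int) : List Int :=
  let s := PySem.List.sorted arr (fun x => x) false
  let p := abc159dRunScan s PySem.Dict.empty 0
  -- cnt[a] exists for every a of arr, so getD is exact here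
  arr.map (fun a => p.2 - p.1.getD a 0 + 1)

-- ===== PRECONDITION & SPEC =====
def Spec_abc159d (n : Int) (arr : List Int) (out : List Int) : Prop := out = abc159d_alt n arr
instance (n : Int) (arr : List Int) (out : List Int) : Decidable (Spec_abc159d n arr out) := by unfold Spec_abc159d; infer_instance

-- ===== CLAIM (what is proved, stated in full; the proofs are below) =====
def Claim_equal_abc159d : Prop := ∀ (n : Int) (arr : List Int), Dom_abc159d n arr → Spec_abc159d n arr (abc159d n arr)

-- ===== LEMMAS AND PROOFS =====

-- common reference value: total number of equal-valued pairs in arr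
def abc159dTri (c : Int) : Int := PySem.Int.floordiv (c * (c - 1)) 2

def abc159dTotal (arr : List Int) : Int :=
  ((PySem.Set.ofList arr).map (fun k => abc159dTri ((arr.count k : Int)))).sum

-- step function of A's counting loop equals modify
lemma stepA_eq (d : PySem.Dict Int Int) (a : Int) :
    (if d.contains a then d.modify a 0 (· + 1) else d.insert a 1) = d.modify a 0 (· + 1) := by
  by_cases h : d.contains a = true
  · simp [h]
  · rw [PySem.Dict.modify, PySem.Dict.getD_of_not_contains _ _ (by simpa using h)]
    simp [h]

lemma foldA_eq_counter (arr : List Int) :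
    arr.foldl (fun d a => if d.contains a then d.modify a 0 (· + 1) else d.insert a 1) PySem.Dict.empty
      = PySem.Dict.counter arr := by
  rw [PySem.Dict.counter_eq_foldl]
  congr 1
  funext d a
  exact stepA_eq d a

lemma items_foldl_erase (l : List Int) (d : PySem.Dict Int Int) :
    (l.foldl (fun d k => d.erase k) d).items = d.items.filter (fun p => !l.contains p.1) := by
  induction l generalizing d with
  | nil => simp
  | cons k l ih =>
      rw [List.foldl_cons, ih]
      show (PySem.Dict.erase d k).items.filter _ = _
      rw [PySem.Dict.erase]
      rw [List.filter_filter]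
      apply List.filter_congr
      intro p _
      simp only [List.contains_cons, Bool.not_or]
      cases hk : (p.1 == k) <;> simp [Bool.and_comm]

lemma sum_filter_eq (S : List Int) (f : Int → Int) (P : Int → Bool)
    (h : ∀ k ∈ S, P k = false → f k = 0) :
    ((S.filter P).map f).sum = (S.map f).sum := by
  induction S with
  | nil => simp
  | cons x S ih =>
      by_cases hx : P x = true
      · simp [hx, ih (fun k hk => h k (List.mem_cons_of_mem _ hk))]
      · simp only [Bool.not_eq_true] at hx
        simp [hx, h x (List.mem_cons_self) hx, ih (fun k hk => h k (List.mem_cons_of_mem _ hk))]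

lemma tri_pred (c : Int) (h : 1 ≤ c) :
    PySem.Int.floordiv (c * (c - 1)) 2 - PySem.Int.floordiv ((c - 1) * (c - 1 - 1)) 2 = c - 1 := by
  obtain ⟨k, hk⟩ : Even (c * (c - 1)) := by
    rcases Int.even_or_odd c with he | ho
    · exact he.mul_right _
    · have h2 : Even (c - 1) := by obtain ⟨j, hj⟩ := ho; exact ⟨j, by omega⟩
      exact h2.mul_left _
  obtain ⟨m, hm⟩ : Even ((c - 1) * (c - 1 - 1)) := by
    rcases Int.even_or_odd (c - 1) with he | ho
    · exact he.mul_right _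
    · have h2 : Even (c - 1 - 1) := by obtain ⟨j, hj⟩ := ho; exact ⟨j, by omega⟩
      exact h2.mul_left _
  rw [PySem.Int.floordiv_eq_ediv_of_pos (by norm_num), PySem.Int.floordiv_eq_ediv_of_pos (by norm_num)]
  rw [hk, hm]
  have e1 : (k + k) / 2 = k := by omega
  have e2 : (m + m) / 2 = m := by omega
  rw [e1, e2]
  have h2 : c * (c - 1) - (c - 1) * (c - 1 - 1) = 2 * (c - 1) := by ring
  omega

-- A returns, for each element, total pairs minus (its count - 1)
lemma A_char (n : Int) (arr : List Int) :
    abc159d n arr = arr.map (fun a => abc159dTotal arr - ((arr.count a : Int) - 1)) := by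
  simp only [abc159d]
  rw [foldA_eq_counter]
  set S := PySem.Set.ofList arr with hS
  set g : Int → Int × Int := fun k => (k, (arr.count k : Int)) with hg
  set q' : Int → Bool := fun k => ((arr.count k : Int) == 1) with hq'
  set P : Int → Bool := fun k => !q' k with hP
  have hitems : (PySem.Dict.counter arr).items = S.map g := PySem.Dict.items_counter arr
  rw [PySem.List.foldl_append_if]
  have hdel : [] ++ ((PySem.Dict.counter arr).items.filter (fun p => p.2 == 1)).map (·.1) = S.filter q' := by
    rw [List.nil_append, hitems, List.filter_map, List.map_map]
    simp [hg, hq', hP, Function.comp_def]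
  rw [hdel]
  have hcontS : ∀ k ∈ S, (S.filter q').contains k = q' k := by
    intro k hk
    by_cases hq : q' k = true
    · simp [List.mem_filter, hk, hq]
    · simp only [Bool.not_eq_true] at hq
      simp [List.mem_filter, hq]
  have h2 : (List.foldl (fun d k => d.erase k) (PySem.Dict.counter arr) (S.filter q')).items
      = (S.filter P).map g := by
    rw [items_foldl_erase, hitems, List.filter_map]
    congr 1
    apply List.filter_congr
    intro k hk
    simp only [Function.comp, hg, hP]
    rw [hcontS k hk]
  set dic2 := List.foldl (fun d k => d.erase k) (PySem.Dict.counter arr) (S.filter q') with hdic2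
  have hkeys : dic2.keys = S.filter P := by
    simp only [PySem.Dict.keys, h2, List.map_map]
    simp [hg, hq', hP, Function.comp_def]
  have hnodup : dic2.keys.Nodup := by
    rw [hkeys]; exact (PySem.Set.nodup_ofList arr).filter _
  have hvals : dic2.values = (S.filter P).map (fun k => (arr.count k : Int)) := by
    simp only [PySem.Dict.values, h2, List.map_map]
    simp [hg, hq', Function.comp_def]
  rw [hvals, PySem.List.foldl_add, List.map_map]
  have htyp : (0 : Int) + (((S.filter P).map ((fun v => PySem.Int.floordiv (v * (v - 1)) 2) ∘ fun k => (arr.count k : Int))).sum)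
      = abc159dTotal arr := by
    rw [abc159dTotal, ← hS]
    rw [sum_filter_eq]
    · simp [abc159dTri, Function.comp_def]
    · intro k hk hPk
      simp only [hP, Bool.not_eq_false', hq', beq_iff_eq] at hPk
      simp [Function.comp, hPk]
  rw [htyp]
  rw [PySem.List.foldl_append_singleton_eq_map, List.nil_append]
  apply List.map_congr_left
  intro a ha
  have haS : a ∈ S := by rw [hS]; exact (PySem.Set.mem_ofList _ _).mpr ha
  have hc1 : 1 ≤ arr.count a := List.count_pos_iff.mpr ha
  by_cases h1 : arr.count a = 1
  · have hnk : a ∉ dic2.keys := by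
      rw [hkeys]
      simp [List.mem_filter, hP, hq', h1]
    have hcont : dic2.contains a = false := by
      rw [← Bool.not_eq_true, PySem.Dict.contains_iff_mem_keys]
      exact hnk
    rw [hcont]
    simp [h1]
  · have hc2 : 2 ≤ arr.count a := by omega
    have hPa : P a = true := by simp [hP, hq']; omega
    have hmemit : (a, (arr.count a : Int)) ∈ dic2.items := by
      rw [h2]
      exact List.mem_map_of_mem (List.mem_filter.mpr ⟨haS, hPa⟩)
    have hcont : dic2.contains a = true := by
      rw [PySem.Dict.contains_iff_mem_keys, hkeys]
      exact List.mem_filter.mpr ⟨haS, hPa⟩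
    have hgetD : dic2.getD a 0 = (arr.count a : Int) :=
      PySem.Dict.getD_of_mem_items dic2 hmemit hnodup 0
    rw [hcont, hgetD]
    simp only [if_true]
    have := tri_pred (arr.count a : Int) (by exact_mod_cast hc1)
    omega

-- the run scan on a nondecreasing list yields exact counts and the triangle-number total
lemma runScan_spec (m : Nat) : ∀ (s : List Int), s.length ≤ m → s.Pairwise (· ≤ ·) →
    ∀ (d : PySem.Dict Int Int) (t : Int),
    (∀ a : Int, ((abc159dRunScan s d t).1).getD a 0
        = if a ∈ s then (s.count a : Int) else d.getD a 0)
    ∧ (abc159dRunScan s d t).2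
        = t + ((PySem.Set.ofList s).map (fun k => abc159dTri ((s.count k : Int)))).sum := by
  induction m with
  | zero =>
      intro s hlen _ d t
      have hs : s = [] := List.length_eq_zero_iff.mp (Nat.le_zero.mp hlen)
      subst hs
      constructor
      · intro a; simp [abc159dRunScan]
      · simp [abc159dRunScan, PySem.Set.ofList]
  | succ m ih =>
      intro s hlen hpw d t
      match s with
      | [] =>
          constructor
          · intro a; simp [abc159dRunScan]
          · simp [abc159dRunScan, PySem.Set.ofList]
      | x :: xs =>
          set tw := xs.takeWhile (fun y => y == x) with htw
          set dw := xs.dropWhile (fun y => y == x) with hdw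
          have hsplit : tw ++ dw = xs := List.takeWhile_append_dropWhile
          have htw_eq : ∀ y ∈ tw, y = x := by
            intro y hy
            have := List.mem_takeWhile_imp hy
            simpa using this
          obtain ⟨hx_le, hpw_xs⟩ := List.pairwise_cons.mp hpw
          have hdw_pw : dw.Pairwise (· ≤ ·) :=
            List.Pairwise.sublist (List.dropWhile_sublist _) hpw_xs
          have hx_not_dw : x ∉ dw := by
            intro hmem
            obtain ⟨h, rest, hdwc⟩ : ∃ h rest, dw = h :: rest := by
              cases hq : dw with
              | nil => rw [hq] at hmem; simp at hmem
              | cons h rest => exact ⟨h, rest, rfl⟩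
            have hhead := List.head?_dropWhile_not (fun y => y == x) xs
            rw [← hdw, hdwc] at hhead
            have hhx : h ≠ x := by simpa using hhead
            have hhmem : h ∈ xs := by
              rw [← hsplit, hdwc]; simp
            have hxh : x < h := lt_of_le_of_ne (hx_le h hhmem) (Ne.symm hhx)
            have hdw_pw' := hdw_pw
            rw [hdwc] at hdw_pw' hmem
            rcases List.mem_cons.mp hmem with he | hrest
            · exact hhx he.symm
            · have hpairs := List.pairwise_cons.mp hdw_pw'
              have : h ≤ x := hpairs.1 x hrest
              omega
          have hct_tw : tw.count x = tw.length :=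
            List.count_eq_length.mpr (fun b hb => (htw_eq b hb).symm)
          have hct_dw : dw.count x = 0 := List.count_eq_zero.mpr hx_not_dw
          have hcx : (x :: xs).count x = 1 + tw.length := by
            rw [List.count_cons_self, ← hsplit, List.count_append, hct_tw, hct_dw]
            omega
          have hca : ∀ a : Int, a ≠ x → (x :: xs).count a = dw.count a := by
            intro a hax
            have htw0 : tw.count a = 0 := List.count_eq_zero.mpr (fun hmem => hax (htw_eq a hmem))
            have hxa : (x == a) = false := by simpa using fun he => hax he.symm
            rw [← hsplit, List.count_cons, List.count_append, htw0, hxa]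
            simp
          have hmem_iff : ∀ k : Int, k ∈ (x :: xs) ↔ (k = x ∨ k ∈ dw) := by
            intro k
            constructor
            · intro hk
              rcases List.mem_cons.mp hk with he | hxs
              · exact Or.inl he
              · rw [← hsplit] at hxs
                rcases List.mem_append.mp hxs with h1 | h2
                · exact Or.inl (htw_eq k h1)
                · exact Or.inr h2
            · rintro (he | hdwm)
              · exact he ▸ List.mem_cons_self
              · apply List.mem_cons_of_mem
                rw [← hsplit]
                exact List.mem_append.mpr (Or.inr hdwm)
          have hdwlen : dw.length ≤ m := by
            have h1 : dw.length ≤ xs.length := List.length_dropWhile_le _ _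
            simp at hlen
            omega
          set run : Int := 1 + ((tw.length : Nat) : Int) with hrun
          obtain ⟨ihd, iht⟩ := ih dw hdwlen hdw_pw (d.insert x run)
            (t + PySem.Int.floordiv (run * (run - 1)) 2)
          have hunfold : abc159dRunScan (x :: xs) d t
              = abc159dRunScan dw (d.insert x run)
                  (t + PySem.Int.floordiv (run * (run - 1)) 2) := by
            rw [abc159dRunScan]
          constructor
          · intro a
            rw [hunfold, ihd a]
            by_cases hadw : a ∈ dw
            · have hax : a ≠ x := fun he => hx_not_dw (he ▸ hadw)
              rw [if_pos hadw, if_pos ((hmem_iff a).mpr (Or.inr hadw)), hca a hax]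
            · rw [if_neg hadw]
              by_cases hax : a = x
              · subst hax
                rw [PySem.Dict.getD_insert_self, if_pos List.mem_cons_self, hcx]
                push_cast
                omega
              · rw [PySem.Dict.getD_insert_of_ne d run 0 hax]
                rw [if_neg (fun hmem => by
                  rcases (hmem_iff a).mp hmem with he | hd
                  · exact hax he
                  · exact hadw hd)]
          · rw [hunfold, iht]
            have hnod_s : (PySem.Set.ofList (x :: xs)).Nodup := PySem.Set.nodup_ofList _
            have hnod_c : (x :: PySem.Set.ofList dw).Nodup := by
              refine List.nodup_cons.mpr ⟨?_, PySem.Set.nodup_ofList _⟩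
              intro hmem
              exact hx_not_dw ((PySem.Set.mem_ofList _ _).mp hmem)
            have hperm : (PySem.Set.ofList (x :: xs)).Perm (x :: PySem.Set.ofList dw) := by
              apply (List.perm_ext_iff_of_nodup hnod_s hnod_c).mpr
              intro k
              rw [PySem.Set.mem_ofList, hmem_iff k, List.mem_cons, PySem.Set.mem_ofList]
            have hsum : ((PySem.Set.ofList (x :: xs)).map
                (fun k => abc159dTri (((x :: xs).count k : Int)))).sum
                = ((x :: PySem.Set.ofList dw).map
                    (fun k => abc159dTri (((x :: xs).count k : Int)))).sum :=
              (hperm.map _).sum_eq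
            rw [hsum]
            rw [List.map_cons, List.sum_cons]
            have hmapeq : (PySem.Set.ofList dw).map (fun k => abc159dTri (((x :: xs).count k : Int)))
                = (PySem.Set.ofList dw).map (fun k => abc159dTri ((dw.count k : Int))) := by
              apply List.map_congr_left
              intro k hk
              have hkdw : k ∈ dw := (PySem.Set.mem_ofList _ _).mp hk
              have hkx : k ≠ x := fun he => hx_not_dw (he ▸ hkdw)
              rw [hca k hkx]
            rw [hmapeq]
            have htri : abc159dTri (((x :: xs).count x : Int))
                = PySem.Int.floordiv (run * (run - 1)) 2 := by
              rw [hcx, abc159dTri, hrun]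
              push_cast
              ring_nf
            rw [htri]
            ring

-- B returns, for each element, total pairs minus (its count - 1)
lemma B_char (n : Int) (arr : List Int) :
    abc159d_alt n arr = arr.map (fun a => abc159dTotal arr - ((arr.count a : Int) - 1)) := by
  simp only [abc159d_alt]
  set s := PySem.List.sorted arr (fun x => x) false with hs
  have hperm : s.Perm arr := PySem.List.sorted_perm arr _ false
  have hpw : s.Pairwise (· ≤ ·) := by
    have := PySem.List.sorted_pairwise arr (fun x : Int => x)
    simpa using this
  obtain ⟨h1, h2⟩ := runScan_spec s.length s le_rfl hpw PySem.Dict.empty 0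
  have hcnt : ∀ a : Int, s.count a = arr.count a := fun a => hperm.count a
  have htot : ((PySem.Set.ofList s).map (fun k => abc159dTri ((s.count k : Int)))).sum
      = abc159dTotal arr := by
    rw [abc159dTotal]
    have hmemeq : ∀ k : Int, k ∈ PySem.Set.ofList s ↔ k ∈ PySem.Set.ofList arr := by
      intro k
      rw [PySem.Set.mem_ofList, PySem.Set.mem_ofList]
      exact hperm.mem_iff
    have hp : (PySem.Set.ofList s).Perm (PySem.Set.ofList arr) :=
      (List.perm_ext_iff_of_nodup (PySem.Set.nodup_ofList _) (PySem.Set.nodup_ofList _)).mpr hmemeq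
    calc ((PySem.Set.ofList s).map (fun k => abc159dTri ((s.count k : Int)))).sum
        = ((PySem.Set.ofList s).map (fun k => abc159dTri ((arr.count k : Int)))).sum := by
          apply congrArg
          apply List.map_congr_left
          intro k _
          rw [hcnt k]
      _ = ((PySem.Set.ofList arr).map (fun k => abc159dTri ((arr.count k : Int)))).sum :=
          (hp.map _).sum_eq
  apply List.map_congr_left
  intro a ha
  have has : a ∈ s := hperm.mem_iff.mpr ha
  rw [h2, h1 a, if_pos has, hcnt a, htot]
  omega

-- ===== VERDICT (by name: the statement is the Claim_ definition above) =====
theorem abc159d_spec : Claim_equal_abc159d := by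
  intro n arr _
  show abc159d n arr = abc159d_alt n arr
  rw [A_char, B_char]
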